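-- pv_equiv track=rewrite | github.com/ffavela/mset | fooling/functions.py | getILL
-- ===== SOURCE A (Python) =====
-- def getILL(N,k):
--     """Returns a list of lists of indices"""
--     def w(i,L):
--         return [ [i] + e for e in L]
--     def f(k,i=0):
--         if i > N-k:
--             return []
--         if k == 0:
--             return [[]]
--         return w(i,f(k-1,i+1)) + f(k,i+1)
--     return f(k)
-- ===== SOURCE B (Python) =====
-- def getILL(N, k):
--     """Returns a list of lists of indices"""
--     if k < 0 or k > N:
--         return []
--     # table[j] = all lexicographic j-combinations of the indices processed so far
--     table = [[[]]] + [[] for _ in range(k)]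
--     for i in reversed(range(N)):
--         table = [table[0]] + [[[i] + c for c in prev] + cur
--                               for prev, cur in zip(table, table[1:])]
--     return table[k]
-- ===== Notes on version B (the rewrite author's own statement) =====
-- stated objective: alternative
-- what changed: Replaces A's top-down branching recursion f(k,i) (pick index i / skip it) by a bottom-up dynamic-programming pass: a table of j-combination lists (j = 0..k) is folded once over the indices N-1..0, plus explicit guards for k < 0 and k > N.
-- crash fix: For k < 0 with k <= N, A's inner recursion never terminates and raises RecursionError; B returns []. — e.g. on getILL(0, -1): A raises RecursionError, B returns []
import Mathlib
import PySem

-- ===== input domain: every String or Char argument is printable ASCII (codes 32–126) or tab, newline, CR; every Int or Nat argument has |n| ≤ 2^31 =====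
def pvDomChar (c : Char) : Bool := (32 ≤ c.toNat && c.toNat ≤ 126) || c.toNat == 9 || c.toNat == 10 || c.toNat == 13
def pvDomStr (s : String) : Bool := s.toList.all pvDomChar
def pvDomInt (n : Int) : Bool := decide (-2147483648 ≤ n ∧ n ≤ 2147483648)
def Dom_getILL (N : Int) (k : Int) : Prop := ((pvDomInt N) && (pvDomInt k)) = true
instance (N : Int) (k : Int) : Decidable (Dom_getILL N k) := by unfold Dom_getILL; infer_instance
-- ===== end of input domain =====

-- B replaces A's top-down recursion by a bottom-up dynamic-programming fold over the indices
-- (objective: alternative decomposition, no speed claim).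

-- ===== PORT A =====
-- helper w(i, L) = [[i] + e for e in L]
def pvA_w (i : Int) (L : List (List Int)) : List (List Int) :=
  L.map (fun e => i :: e)

-- f(k, i): the inner recursion of A, made total with a fuel counter.  The fuel only cuts
-- off the recursion A itself never finishes (k < 0 ≤ N - k, a RecursionError, outside Pre_);
-- N.toNat + 2 exceeds the recursion depth on every input Pre_ admits.
def pvA_f (N : Int) (fuel : Nat) (k i : Int) : List (List Int) :=
  match fuel with
  | 0 => []
  | fuel + 1 =>
    if N - k < i then []
    else if k = 0 then [[]]
    else pvA_w i (pvA_f N fuel (k - 1) (i + 1)) ++ pvA_f N fuel k (i + 1)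

def getILL (N : Int) (k : Int) : List (List Int) :=
  pvA_f N (N.toNat + 2) k 0

-- ===== PORT B =====
-- one pass of the loop body: table = [table[0]] + [[[i]+c for c in prev] + cur for prev, cur in zip(table, table[1:])]
-- (table[0] rendered as take 1: table is never empty where B uses it)
def pvB_step (i : Int) (table : List (List (List Int))) : List (List (List Int)) :=
  table.take 1 ++ (table.zip table.tail).map (fun pc => pc.1.map (fun c => i :: c) ++ pc.2)

def getILL_alt (N : Int) (k : Int) : List (List Int) :=
  if k < 0 ∨ N < k then []
  else
    let init : List (List (List Int)) := [[[]]] ++ List.replicate k.toNat []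
    let table := ((PySem.List.pyRange 0 N 1).reverse).foldl (fun t i => pvB_step i t) init
    match PySem.List.pyGet? table k with
    | some r => r
    | none => []

-- ===== PRECONDITION & SPEC =====
-- Pre_ excludes exactly k < 0 ∧ k ≤ N, where Python A recurses forever (RecursionError).
def Pre_getILL (N : Int) (k : Int) : Prop := 0 ≤ k ∨ N < k
instance (N : Int) (k : Int) : Decidable (Pre_getILL N k) := by unfold Pre_getILL; infer_instance
def pvWitness_getILL : Int × Int := (4, 2)

-- On k < 0 ∧ k ≤ N Python A raises RecursionError; B returns [].
def Raises_getILL (N : Int) (k : Int) : Prop := k < 0 ∧ k ≤ N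
instance (N : Int) (k : Int) : Decidable (Raises_getILL N k) := by unfold Raises_getILL; infer_instance
def pvRaiseWitness_getILL : Int × Int := (0, -1)
def pvRaiseWitnessOut_getILL : List (List Int) := []

def Spec_getILL (N : Int) (k : Int) (out : List (List Int)) : Prop := out = getILL_alt N k
instance (N : Int) (k : Int) (out : List (List Int)) : Decidable (Spec_getILL N k out) := by unfold Spec_getILL; infer_instance

-- ===== CLAIM (what is proved, stated in full; the proofs are below) =====
def Claim_equal_getILL : Prop := ∀ (N : Int) (k : Int), Dom_getILL N k → Pre_getILL N k → Spec_getILL N k (getILL N k)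
def Claim_raises_getILL : Prop := (∀ (N : Int) (k : Int), Dom_getILL N k → Raises_getILL N k → ¬ Pre_getILL N k) ∧ (Dom_getILL (pvRaiseWitness_getILL.1) (pvRaiseWitness_getILL.2) ∧ Raises_getILL (pvRaiseWitness_getILL.1) (pvRaiseWitness_getILL.2) ∧ getILL_alt (pvRaiseWitness_getILL.1) (pvRaiseWitness_getILL.2) = pvRaiseWitnessOut_getILL)

-- ===== LEMMAS AND PROOFS =====

-- the common mathematical value: comb N j i = A's f(j, i) for j >= 0
def comb (N : Int) : Nat → Int → List (List Int)
  | 0, i => if N < i then [] else [[]]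
  | (j+1), i =>
    if h : N - (j+1 : Int) < i then []
    else (comb N j (i+1)).map (fun c => i :: c) ++ comb N (j+1) (i+1)
  termination_by j i => (j, (N + 1 - i).toNat)
  decreasing_by
  · exact Prod.Lex.left _ _ (Nat.lt_succ_self j)
  · apply Prod.Lex.right; omega

lemma comb_zero (N i : Int) : comb N 0 i = if N < i then [] else [[]] := by
  rw [comb]

lemma comb_succ_pos (N : Int) (j : Nat) (i : Int) (h : N - ((j : Int) + 1) < i) :
    comb N (j+1) i = [] := by
  rw [comb, dif_pos (by push_cast; omega)]

lemma comb_succ_neg (N : Int) (j : Nat) (i : Int) (h : i ≤ N - ((j : Int) + 1)) :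
    comb N (j+1) i = (comb N j (i+1)).map (fun c => i :: c) ++ comb N (j+1) (i+1) := by
  rw [comb, dif_neg (by push_cast; omega)]

lemma comb_step (N : Int) (j : Nat) (i : Int) (h : i ≤ N - 1) :
    comb N (j+1) i = (comb N j (i+1)).map (fun c => i :: c) ++ comb N (j+1) (i+1) := by
  by_cases hg : N - ((j : Int) + 1) < i
  · rw [comb_succ_pos N j i hg]
    cases j with
    | zero => omega
    | succ j' =>
      rw [comb_succ_pos N j' (i+1) (by push_cast at hg ⊢; omega),
          comb_succ_pos N (j'+1) (i+1) (by push_cast at hg ⊢; omega)]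
      simp
  · exact comb_succ_neg N j i (by omega)

lemma pvA_eq_comb (N : Int) : ∀ (fuel : Nat) (k i : Int), 0 ≤ k →
    (N + 1 - i).toNat + 1 ≤ fuel → pvA_f N fuel k i = comb N k.toNat i := by
  intro fuel
  induction fuel with
  | zero => intro k i _ h; omega
  | succ fuel ih =>
    intro k i hk hf
    rw [pvA_f]
    rcases Int.eq_ofNat_of_zero_le hk with ⟨n, rfl⟩
    rw [show ((n : Int)).toNat = n by omega]
    by_cases hg : N - (n : Int) < i
    · rw [if_pos hg]
      cases n with
      | zero => rw [comb_zero, if_pos (by push_cast at hg; omega)]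
      | succ j => rw [comb_succ_pos N j i (by push_cast at hg ⊢; omega)]
    · rw [if_neg hg]
      cases n with
      | zero => rw [if_pos (by norm_num), comb_zero, if_neg (by push_cast at hg; omega)]
      | succ j =>
        rw [if_neg (by push_cast; omega)]
        have hi : i ≤ N := by push_cast at hg; omega
        have h1 : pvA_f N fuel (((j+1 : Nat) : Int) - 1) (i+1) = comb N j (i+1) := by
          have := ih (((j+1 : Nat) : Int) - 1) (i+1) (by push_cast; omega) (by omega)
          rwa [show (((j+1 : Nat) : Int) - 1).toNat = j by omega] at this
        have h2 : pvA_f N fuel ((j+1 : Nat) : Int) (i+1) = comb N (j+1) (i+1) := by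
          have := ih ((j+1 : Nat) : Int) (i+1) (by push_cast; omega) (by omega)
          rwa [show (((j+1 : Nat) : Int)).toNat = j+1 by omega] at this
        rw [pvA_w, h1, h2, comb_succ_neg N j i (by push_cast at hg; omega)]

lemma zip_tail_range {α : Type} : ∀ (n : Nat) (f : Nat → α),
    (((List.range (n+1)).map f).zip ((List.range (n+1)).map f).tail)
      = (List.range n).map (fun j => (f j, f (j+1))) := by
  intro n
  induction n with
  | zero => intro f; simp
  | succ n ih =>
    intro f
    have h1 : (List.range (n+1+1)).map f = f 0 :: (List.range (n+1)).map (f ∘ Nat.succ) := by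
      rw [List.range_succ_eq_map, List.map_cons, List.map_map]
    have hM : (List.range (n+1)).map (f ∘ Nat.succ)
        = (f ∘ Nat.succ) 0 :: (List.range n).map ((f ∘ Nat.succ) ∘ Nat.succ) := by
      rw [List.range_succ_eq_map, List.map_cons, List.map_map]
    have hIH := ih (f ∘ Nat.succ)
    rw [hM, List.tail_cons] at hIH
    rw [h1, List.tail_cons, hM, List.zip_cons_cons, hIH]
    rw [List.range_succ_eq_map, List.map_cons, List.map_map]
    rfl

lemma step_eq (N i : Int) (K : Nat) (h : i ≤ N - 1) :
    pvB_step i ((List.range (K+1)).map (fun j => comb N j (i+1)))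
      = (List.range (K+1)).map (fun j => comb N j i) := by
  unfold pvB_step
  rw [zip_tail_range]
  rw [List.range_succ_eq_map]
  simp only [List.map_cons, List.map_map, List.take_succ_cons, List.take_zero]
  rw [List.cons_append, List.nil_append]
  congr 1
  · rw [comb_zero, comb_zero, if_neg (by omega), if_neg (by omega)]
  · apply List.map_congr_left
    intro j _
    simp only [Function.comp_apply]
    exact (comb_step N j i h).symm

lemma fold_eq (N : Int) (K : Nat) : ∀ (m : Nat), (m : Int) ≤ N →
    (((List.range m).map (fun n : Nat => (n : Int))).reverse).foldl (fun t i => pvB_step i t)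
        ((List.range (K+1)).map (fun j => comb N j (m : Int)))
      = (List.range (K+1)).map (fun j => comb N j 0) := by
  intro m
  induction m with
  | zero => intro _; simp
  | succ m ih =>
    intro hm
    push_cast at hm
    rw [show List.range (m+1) = List.range m ++ [m] from List.range_succ, List.map_append,
        List.reverse_append]
    simp only [List.map_cons, List.map_nil, List.reverse_cons, List.reverse_nil, List.nil_append,
      List.cons_append, List.foldl_cons]
    push_cast
    rw [step_eq N (m : Int) K (by omega)]
    exact ih (by push_cast; omega)

lemma init_eq (N : Int) (K : Nat) (hN : 0 ≤ N) :
    ([[[]]] ++ List.replicate K ([] : List (List Int)))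
      = (List.range (K+1)).map (fun j => comb N j N) := by
  have h0 : comb N 0 N = [[]] := by rw [comb_zero, if_neg (by omega)]
  rw [List.range_succ_eq_map, List.map_cons, List.map_map, h0]
  simp only [List.cons_append, List.nil_append]
  congr 1
  have hall : ∀ j ∈ List.range K, ((fun j => comb N j N) ∘ Nat.succ) j = ([] : List (List Int)) := by
    intro j _
    simp only [Function.comp_apply]
    exact comb_succ_pos N j N (by push_cast; omega)
  rw [List.map_congr_left hall, List.map_const', List.length_range]

-- ===== VERDICT (by name: the statement is the Claim_ definition above) =====
theorem getILL_spec : Claim_equal_getILL := by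
  intro N k _ hpre
  unfold Spec_getILL getILL getILL_alt
  by_cases hNk : N < k
  · rw [if_pos (Or.inr hNk)]
    rw [pvA_f]
    rw [if_pos (by omega)]
  · have hk : 0 ≤ k := by rcases hpre with h | h <;> omega
    have hN : 0 ≤ N := by omega
    rcases Int.eq_ofNat_of_zero_le hk with ⟨K, rfl⟩
    rw [if_neg (by omega)]
    simp only [Int.toNat_natCast]
    have hget : PySem.List.pyGet? ((List.range (K+1)).map (fun j => comb N j 0)) ((K : Nat) : Int)
        = some (comb N K 0) := by
      simp
    rw [PySem.List.pyRange_one, show N - 0 = N by ring,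
        show (fun j : Nat => (0 : Int) + (j : Int)) = (fun j : Nat => (j : Int)) by funext j; ring,
        init_eq N K hN,
        show (fun j : Nat => comb N j N) = (fun j : Nat => comb N j ((N.toNat : Nat) : Int)) by
          rw [Int.toNat_of_nonneg hN],
        fold_eq N K N.toNat (by omega), hget,
        pvA_eq_comb N (N.toNat + 2) (K : Int) 0 hk (by omega), Int.toNat_natCast]

@[simp] theorem getILL_raises : Claim_raises_getILL := by
  unfold Claim_raises_getILL
  constructor
  · intro N k _ hr
    unfold Raises_getILL at hr
    unfold Pre_getILL
    omega
  · refine ⟨by decide, by decide, by decide⟩
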